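-- pv_equiv track=rewrite | github.com/BU-Spark/ml-naacp | se_ml_production/ML_LLM_Pipeline/ML_GKE/ML_Service_GKE/Model_Utils/model_Utils.py | filter_loc_explicit
-- ===== SOURCE A (Python) =====
-- def filter_loc_explicit(x):
--     """
--     Filter the explicit mentions in first NER Pass
--     """
--     if (x == None):
--         return None
--     res = []
--     for tup in x:
--         if (len(tup) >= 2):
--             if (("GPE" in tup[1] and "Boston" not in tup[0] and "Massachusetts" not in tup[0])
--                 or ("ORG" in tup[1])
--                 or ("FAC" in tup[1])
--                 or ("LOC" in tup[1])
--             ):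
--                 res.append((tup[0], tup[1].strip()))
--     priority = {'FAC': 1, 'ORG': 2, 'LOC': 3, 'GPE': 4}
--     sorted_list = sorted(res, key=lambda x: priority[x[1]])
--
--     return sorted_list
-- ===== SOURCE B (Python) =====
-- def filter_loc_explicit(x):
--     """
--     Filter the explicit mentions in first NER Pass
--     (bucket pass instead of a trailing comparison sort)
--     """
--     if x is None:
--         return None
--     buckets = {'FAC': [], 'ORG': [], 'LOC': [], 'GPE': []}
--     for tup in x:
--         if len(tup) >= 2:
--             if (("GPE" in tup[1] and "Boston" not in tup[0] and "Massachusetts" not in tup[0])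
--                 or ("ORG" in tup[1])
--                 or ("FAC" in tup[1])
--                 or ("LOC" in tup[1])
--             ):
--                 tag = tup[1].strip()
--                 buckets[tag].append((tup[0], tag))
--     return buckets['FAC'] + buckets['ORG'] + buckets['LOC'] + buckets['GPE']
-- ===== Notes on version B (the rewrite author's own statement) =====
-- stated objective: alternative
-- what changed: B replaces A's trailing comparison sort with priority dict (sorted(res, key=priority[tag])) by a single bucket pass: while filtering it appends each qualifying tuple into one of four fixed buckets keyed by the stripped tag and returns buckets FAC+ORG+LOC+GPE concatenated, which reproduces the stable priority order without sorting.
import Mathlib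
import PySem

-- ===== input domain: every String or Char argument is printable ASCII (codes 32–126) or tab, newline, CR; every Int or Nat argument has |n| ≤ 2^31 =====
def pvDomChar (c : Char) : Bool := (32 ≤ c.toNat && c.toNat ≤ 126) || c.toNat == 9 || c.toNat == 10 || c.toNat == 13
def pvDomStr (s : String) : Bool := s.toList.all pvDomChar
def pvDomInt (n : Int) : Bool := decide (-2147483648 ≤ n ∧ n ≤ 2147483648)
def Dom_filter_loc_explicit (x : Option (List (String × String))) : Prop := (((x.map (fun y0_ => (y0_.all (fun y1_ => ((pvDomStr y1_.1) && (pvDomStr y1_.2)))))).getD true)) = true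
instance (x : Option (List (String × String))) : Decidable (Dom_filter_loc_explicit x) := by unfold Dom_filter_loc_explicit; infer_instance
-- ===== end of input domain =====

-- B replaces A's trailing sorted(key=priority[...]) by a single bucket pass (append into four
-- fixed buckets while filtering, then concatenate); objective: alternative (no timed speed claim).

-- ===== PORT A =====
-- The filter test both Pythons spell out verbatim ('len(tup) >= 2' is always true for a pair).
def pvCond (t : String × String) : Bool :=
  (PySem.Str.isIn "GPE" t.2 && !PySem.Str.isIn "Boston" t.1 && !PySem.Str.isIn "Massachusetts" t.1)
  || PySem.Str.isIn "ORG" t.2 || PySem.Str.isIn "FAC" t.2 || PySem.Str.isIn "LOC" t.2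

def pvPriority : PySem.Dict String Int :=
  ((((PySem.Dict.empty).insert "FAC" 1).insert "ORG" 2).insert "LOC" 3).insert "GPE" 4

def filter_loc_explicit (x : Option (List (String × String))) : Option (List (String × String)) :=
  match x with
  | none => none
  | some l =>
    let res := l.foldl (fun acc tup =>
      if pvCond tup then acc ++ [(tup.1, PySem.Str.strip tup.2)] else acc) []
    -- priority[x[1]] raises KeyError on a tag outside the dict — excluded by Pre_; total form getD 0
    some (PySem.List.sorted res (fun p => pvPriority.getD p.2 0))

-- ===== PORT B =====
def filter_loc_explicit_alt (x : Option (List (String × String))) : Option (List (String × String)) :=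
  match x with
  | none => none
  | some l =>
    let b := l.foldl (fun (b : List (String × String) × List (String × String) × List (String × String) × List (String × String)) tup =>
        if pvCond tup then
          let t := PySem.Str.strip tup.2
          if t = "FAC" then (b.1 ++ [(tup.1, t)], b.2.1, b.2.2.1, b.2.2.2)
          else if t = "ORG" then (b.1, b.2.1 ++ [(tup.1, t)], b.2.2.1, b.2.2.2)
          else if t = "LOC" then (b.1, b.2.1, b.2.2.1 ++ [(tup.1, t)], b.2.2.2)
          else if t = "GPE" then (b.1, b.2.1, b.2.2.1, b.2.2.2 ++ [(tup.1, t)])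
          else b   -- buckets[tag] raises KeyError here in Python — excluded by Pre_
        else b)
      (([], [], [], []) : List (String × String) × List (String × String) × List (String × String) × List (String × String))
    some (b.1 ++ b.2.1 ++ b.2.2.1 ++ b.2.2.2)

-- ===== PRECONDITION & SPEC =====
-- Pre_ excludes exactly the inputs where both Pythons raise KeyError: a tuple that passes the
-- filter but whose stripped tag is not one of FAC/ORG/LOC/GPE.
def Pre_filter_loc_explicit (x : Option (List (String × String))) : Prop :=
  ((x.getD []).all (fun t => !pvCond t ||
    (PySem.Str.strip t.2 == "FAC" || PySem.Str.strip t.2 == "ORG" ||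
     PySem.Str.strip t.2 == "LOC" || PySem.Str.strip t.2 == "GPE"))) = true
instance (x : Option (List (String × String))) : Decidable (Pre_filter_loc_explicit x) := by
  unfold Pre_filter_loc_explicit; infer_instance

def pvWitness_filter_loc_explicit : (Option (List (String × String))) :=
  some [("Fenway Park", " FAC"), ("Boston", "GPE"), ("MBTA", "ORG")]

def Spec_filter_loc_explicit (x : Option (List (String × String))) (out : Option (List (String × String))) : Prop := out = filter_loc_explicit_alt x
instance (x : Option (List (String × String))) (out : Option (List (String × String))) : Decidable (Spec_filter_loc_explicit x out) := by unfold Spec_filter_loc_explicit; infer_instance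

-- ===== CLAIM (what is proved, stated in full; the proofs are below) =====
def Claim_equal_filter_loc_explicit : Prop := ∀ (x : Option (List (String × String))), Dom_filter_loc_explicit x → Pre_filter_loc_explicit x → Spec_filter_loc_explicit x (filter_loc_explicit x)

-- ===== LEMMAS AND PROOFS =====

-- abbreviations used only by the proofs
def pvF (tup : String × String) : String × String := (tup.1, PySem.Str.strip tup.2)

def pvKey (p : String × String) : Int := pvPriority.getD p.2 0

def pvStep (b : List (String × String) × List (String × String) × List (String × String) × List (String × String))
    (r : String × String) :
    List (String × String) × List (String × String) × List (String × String) × List (String × String) :=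
  if r.2 = "FAC" then (b.1 ++ [r], b.2.1, b.2.2.1, b.2.2.2)
  else if r.2 = "ORG" then (b.1, b.2.1 ++ [r], b.2.2.1, b.2.2.2)
  else if r.2 = "LOC" then (b.1, b.2.1, b.2.2.1 ++ [r], b.2.2.2)
  else if r.2 = "GPE" then (b.1, b.2.1, b.2.2.1, b.2.2.2 ++ [r])
  else b

-- B's fold over the raw list is the bucket fold over the filtered-and-stripped list
lemma foldB_eq_foldRes (l : List (String × String)) (b0 : List (String × String) × List (String × String) × List (String × String) × List (String × String)) :
    l.foldl (fun b tup => if pvCond tup then pvStep b (pvF tup) else b) b0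
      = ((l.filter pvCond).map pvF).foldl pvStep b0 := by
  induction l generalizing b0 with
  | nil => rfl
  | cons t ts ih =>
    by_cases h : pvCond t = true <;> simp [h, ih]

def pvBlk (s : String) (res : List (String × String)) : List (String × String) :=
  res.filter (fun r => r.2 == s)

-- the bucket fold collects, per bucket, exactly the elements with that tag, in order
lemma foldRes_buckets (res : List (String × String))
    (h : ∀ r ∈ res, r.2 = "FAC" ∨ r.2 = "ORG" ∨ r.2 = "LOC" ∨ r.2 = "GPE")
    (b0 : List (String × String) × List (String × String) × List (String × String) × List (String × String)) :
    res.foldl pvStep b0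
      = (b0.1 ++ pvBlk "FAC" res, b0.2.1 ++ pvBlk "ORG" res,
         b0.2.2.1 ++ pvBlk "LOC" res, b0.2.2.2 ++ pvBlk "GPE" res) := by
  induction res generalizing b0 with
  | nil => simp [pvBlk]
  | cons r rs ih =>
    have hr := h r (by simp)
    have hrs : ∀ r ∈ rs, r.2 = "FAC" ∨ r.2 = "ORG" ∨ r.2 = "LOC" ∨ r.2 = "GPE" :=
      fun q hq => h q (by simp [hq])
    rcases hr with h1 | h1 | h1 | h1 <;>
      simp [pvStep, pvBlk, h1, ih hrs, List.append_assoc]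

-- key values of the priority dict
lemma pvKey_eq (r : String × String) :
    (r.2 = "FAC" → pvKey r = 1) ∧ (r.2 = "ORG" → pvKey r = 2) ∧
    (r.2 = "LOC" → pvKey r = 3) ∧ (r.2 = "GPE" → pvKey r = 4) := by
  refine ⟨fun h => ?_, fun h => ?_, fun h => ?_, fun h => ?_⟩ <;>
    simp [pvKey, h] <;> decide

-- inserting x into u ++ v where u's keys are ≤ key x and v's keys are > key x puts x between them
lemma insertBy_blocks (key : String × String → Int) (x : String × String)
    (u v : List (String × String))
    (hu : ∀ y ∈ u, key y ≤ key x) (hv : ∀ y ∈ v, key x < key y) :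
    PySem.List.insertBy (fun a b => decide (key a < key b)) x (u ++ v) = u ++ x :: v := by
  induction u with
  | nil =>
    cases v with
    | nil => rfl
    | cons y ys =>
      have : key x < key y := hv y (by simp)
      simp [PySem.List.insertBy, this]
  | cons a u' ih =>
    have h1 : ¬ key x < key a := not_lt.mpr (hu a (by simp))
    simp only [List.cons_append, PySem.List.insertBy, decide_eq_true_eq, if_neg h1]
    exact congrArg (a :: ·) (ih (fun y hy => hu y (by simp [hy])))

-- stable sort by the 4-valued priority key is the concatenation of the four tag blocks
lemma sorted_eq_blocks (res : List (String × String))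
    (h : ∀ r ∈ res, r.2 = "FAC" ∨ r.2 = "ORG" ∨ r.2 = "LOC" ∨ r.2 = "GPE") :
    PySem.List.sorted res pvKey
      = pvBlk "FAC" res ++ pvBlk "ORG" res ++ pvBlk "LOC" res ++ pvBlk "GPE" res := by
  rw [PySem.List.sorted_eq_foldl_insertBy]
  induction res using List.reverseRecOn with
  | nil => rfl
  | append_singleton rs r ih =>
    have hrs : ∀ q ∈ rs, q.2 = "FAC" ∨ q.2 = "ORG" ∨ q.2 = "LOC" ∨ q.2 = "GPE" :=
      fun q hq => h q (by simp [hq])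
    rw [List.foldl_append, List.foldl_cons, List.foldl_nil, ih hrs]
    have keyBlk : ∀ s : String, ∀ c : Int,
        (∀ q : String × String, q.2 = s → pvKey q = c) →
        ∀ y ∈ pvBlk s rs, pvKey y = c := by
      intro s c hc y hy
      have : y.2 = s := by
        have := List.of_mem_filter hy
        simpa using this
      exact hc y this
    have k1 := keyBlk "FAC" 1 (fun q hq => (pvKey_eq q).1 hq)
    have k2 := keyBlk "ORG" 2 (fun q hq => (pvKey_eq q).2.1 hq)
    have k3 := keyBlk "LOC" 3 (fun q hq => (pvKey_eq q).2.2.1 hq)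
    have k4 := keyBlk "GPE" 4 (fun q hq => (pvKey_eq q).2.2.2 hq)
    rcases h r (by simp) with h1 | h1 | h1 | h1
    · -- r goes at the end of the FAC block
      have hk := (pvKey_eq r).1 h1
      have := insertBy_blocks pvKey r (pvBlk "FAC" rs)
        (pvBlk "ORG" rs ++ pvBlk "LOC" rs ++ pvBlk "GPE" rs)
        (fun y hy => by rw [k1 y hy, hk])
        (fun y hy => by
          rw [hk]
          rcases List.mem_append.1 hy with hy' | hy'
          · rcases List.mem_append.1 hy' with hy'' | hy''
            · rw [k2 y hy'']; norm_num
            · rw [k3 y hy'']; norm_num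
          · rw [k4 y hy']; norm_num)
      simp only [List.append_assoc] at this ⊢
      rw [this]
      simp [pvBlk, List.filter_append, h1]
    · have hk := (pvKey_eq r).2.1 h1
      have := insertBy_blocks pvKey r (pvBlk "FAC" rs ++ pvBlk "ORG" rs)
        (pvBlk "LOC" rs ++ pvBlk "GPE" rs)
        (fun y hy => by
          rw [hk]
          rcases List.mem_append.1 hy with hy' | hy'
          · rw [k1 y hy']; norm_num
          · rw [k2 y hy'])
        (fun y hy => by
          rw [hk]
          rcases List.mem_append.1 hy with hy' | hy'
          · rw [k3 y hy']; norm_num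
          · rw [k4 y hy']; norm_num)
      simp only [List.append_assoc] at this ⊢
      rw [this]
      simp [pvBlk, List.filter_append, h1]
    · have hk := (pvKey_eq r).2.2.1 h1
      have := insertBy_blocks pvKey r (pvBlk "FAC" rs ++ pvBlk "ORG" rs ++ pvBlk "LOC" rs)
        (pvBlk "GPE" rs)
        (fun y hy => by
          rw [hk]
          rcases List.mem_append.1 hy with hy' | hy'
          · rcases List.mem_append.1 hy' with hy'' | hy''
            · rw [k1 y hy'']; norm_num
            · rw [k2 y hy'']; norm_num
          · rw [k3 y hy'])
        (fun y hy => by rw [hk, k4 y hy]; norm_num)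
      simp only [List.append_assoc] at this ⊢
      rw [this]
      simp [pvBlk, List.filter_append, h1, List.append_assoc]
    · have hk := (pvKey_eq r).2.2.2 h1
      have := insertBy_blocks pvKey r
        (pvBlk "FAC" rs ++ pvBlk "ORG" rs ++ pvBlk "LOC" rs ++ pvBlk "GPE" rs) []
        (fun y hy => by
          rw [hk]
          rcases List.mem_append.1 hy with hy' | hy'
          · rcases List.mem_append.1 hy' with hy'' | hy''
            · rcases List.mem_append.1 hy'' with h3 | h3
              · rw [k1 y h3]; norm_num
              · rw [k2 y h3]; norm_num
            · rw [k3 y hy'']; norm_num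
          · rw [k4 y hy'])
        (fun y hy => by simp at hy)
      simp only [List.append_assoc, List.append_nil] at this ⊢
      rw [this]
      simp [pvBlk, List.filter_append, h1]

-- ===== VERDICT (by name: the statement is the Claim_ definition above) =====
set_option maxHeartbeats 1000000 in
theorem filter_loc_explicit_spec : Claim_equal_filter_loc_explicit := by
  intro x _ hpre
  unfold Spec_filter_loc_explicit
  cases x with
  | none => rfl
  | some l =>
    have hres : ∀ r ∈ (l.filter pvCond).map pvF,
        r.2 = "FAC" ∨ r.2 = "ORG" ∨ r.2 = "LOC" ∨ r.2 = "GPE" := by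
      intro r hr
      rcases List.mem_map.1 hr with ⟨t, ht, rfl⟩
      have hc : pvCond t = true := List.of_mem_filter ht
      have ht' : t ∈ l := List.mem_of_mem_filter ht
      simp only [Pre_filter_loc_explicit, Option.getD_some, List.all_eq_true] at hpre
      have h2 := hpre t ht'
      rw [hc] at h2
      simp only [Bool.not_true, Bool.false_or, Bool.or_eq_true, beq_iff_eq] at h2
      simp only [pvF]
      tauto
    show filter_loc_explicit (some l) = filter_loc_explicit_alt (some l)
    simp only [filter_loc_explicit, filter_loc_explicit_alt]
    have hA := PySem.List.foldl_append_if pvCond pvF l ([] : List (String × String))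
    simp only [pvF] at hA
    rw [hA]
    have hB := foldB_eq_foldRes l ([], [], [], [])
    simp only [pvStep, pvF] at hB
    rw [hB, foldRes_buckets _ hres]
    simp only [List.nil_append]
    rw [show (fun p : String × String => pvPriority.getD p.2 0) = pvKey from rfl,
        sorted_eq_blocks _ hres]
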